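-- pv_equiv track=rewrite | github.com/zjzser/ACE-Step-1.5 | acestep/gpu_config.py | find_best_lm_model_on_disk
-- ===== SOURCE A (Python) =====
-- from typing import Optional, List, Dict, Tuple
--
-- def get_lm_model_size(model_path: str) -> str:
--     """
--     Extract LM model size from model path.
--
--     Args:
--         model_path: Model path string (e.g., "acestep-5Hz-lm-0.6B", "acestep-5Hz-lm-0.6B-v4-fix")
--
--     Returns:
--         Model size string: "0.6B", "1.7B", or "4B"
--     """
--     if "0.6B" in model_path:
--         return "0.6B"
--     elif "1.7B" in model_path:
--         return "1.7B"
--     elif "4B" in model_path: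
--         return "4B"
--     else:
--         # Default to smallest model assumption
--         return "0.6B"
--
-- def find_best_lm_model_on_disk(
--     recommended_model: str, disk_models: List[str]
-- ) -> Optional[str]:
--     """
--     Find the best matching disk model for a recommended tier model.
--
--     If the exact recommended model exists on disk, return it.
--     Otherwise, find a disk model with the same size class (e.g., "0.6B").
--     Prefers models with version suffixes (e.g., "-v4-fix") as they are likely newer.
--
--     Args:
--         recommended_model: Tier-recommended model name (e.g., "acestep-5Hz-lm-0.6B")
--         disk_models: List of model names actually on disk
--
--     Returns:
--         Best matching disk model name, or None if no match
--     """
--     if not recommended_model or not disk_models: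
--         return disk_models[0] if disk_models else None
--
--     # Exact match first
--     if recommended_model in disk_models:
--         return recommended_model
--
--     # Size-based match: find all disk models with same size
--     target_size = get_lm_model_size(recommended_model)
--     candidates = [m for m in disk_models if get_lm_model_size(m) == target_size]
--
--     if candidates:
--         # Prefer the one with the longest name (likely has version suffix = newer)
--         return max(candidates, key=len)
--
--     # No match for recommended size; return first available disk model
--     return disk_models[0] if disk_models else None
-- ===== SOURCE B (Python) =====
-- def _lm_size(model_path):
--     return next((s for s in ("0.6B", "1.7B", "4B") if s in model_path), "0.6B")
--
-- def find_best_lm_model_on_disk(recommended_model, disk_models):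
--     if not recommended_model or not disk_models:
--         return disk_models[0] if disk_models else None
--     target = _lm_size(recommended_model)
--     best = None
--     for m in disk_models:
--         if m == recommended_model:
--             return m
--         if _lm_size(m) == target and (best is None or len(m) > len(best)):
--             best = m
--     return best if best is not None else disk_models[0]
-- ===== Notes on version B (the rewrite author's own statement) =====
-- stated objective: simpler
-- what changed: Replaced A's three separate passes (membership test, filter comprehension, max-by-length) with one early-returning loop that returns the exact match when reached and otherwise tracks the longest same-size candidate (strict > preserves max's first-maximum tie-break); the size helper becomes a first-match scan over the three size tokens instead of an if/elif chain.
import Mathlib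
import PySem

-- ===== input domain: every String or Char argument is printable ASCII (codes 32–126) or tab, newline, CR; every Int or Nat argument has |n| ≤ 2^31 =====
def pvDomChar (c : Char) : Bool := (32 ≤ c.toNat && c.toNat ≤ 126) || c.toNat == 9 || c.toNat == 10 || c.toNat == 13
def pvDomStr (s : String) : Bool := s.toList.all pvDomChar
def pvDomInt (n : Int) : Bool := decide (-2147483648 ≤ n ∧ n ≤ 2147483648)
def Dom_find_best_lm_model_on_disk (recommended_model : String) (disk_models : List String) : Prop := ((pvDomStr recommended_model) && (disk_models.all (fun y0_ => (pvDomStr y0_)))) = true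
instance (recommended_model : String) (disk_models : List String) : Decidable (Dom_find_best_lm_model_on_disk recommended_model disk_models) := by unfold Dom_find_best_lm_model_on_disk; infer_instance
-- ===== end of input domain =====

-- B fuses A's exact-match scan, the candidates comprehension and the max-by-length pass into one
-- single early-returning loop that tracks the current best candidate (objective: simpler one-pass).

-- ===== PORT A =====
def get_lm_model_size (model_path : String) : String :=
  if PySem.Str.isIn "0.6B" model_path then "0.6B"
  else if PySem.Str.isIn "1.7B" model_path then "1.7B"
  else if PySem.Str.isIn "4B" model_path then "4B"
  else "0.6B"

def find_best_lm_model_on_disk (recommended_model : String) (disk_models : List String) : Option String :=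
  if recommended_model = "" ∨ disk_models = [] then
    disk_models.head?
  else if recommended_model ∈ disk_models then
    some recommended_model
  else
    let target_size := get_lm_model_size recommended_model
    let candidates := disk_models.filter (fun m => get_lm_model_size m == target_size)
    if candidates ≠ [] then
      PySem.List.max? candidates PySem.Str.len
    else
      disk_models.head?

-- ===== PORT B =====
def lm_size_alt (model_path : String) : String :=
  ((["0.6B", "1.7B", "4B"] : List String).find? (fun s => PySem.Str.isIn s model_path)).getD "0.6B"

def fbm_loop (recommended_model target : String) : Option String → List String → Option String
  | best, [] => best
  | best, m :: rest =>
    if m = recommended_model then some m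
    else if lm_size_alt m = target ∧ (best = none ∨ ∃ c, best = some c ∧ PySem.Str.len c < PySem.Str.len m) then
      fbm_loop recommended_model target (some m) rest
    else
      fbm_loop recommended_model target best rest

def find_best_lm_model_on_disk_alt (recommended_model : String) (disk_models : List String) : Option String :=
  if recommended_model = "" ∨ disk_models = [] then
    disk_models.head?
  else
    match fbm_loop recommended_model (lm_size_alt recommended_model) none disk_models with
    | some b => some b
    | none => disk_models.head?

-- ===== PRECONDITION & SPEC =====
def Spec_find_best_lm_model_on_disk (recommended_model : String) (disk_models : List String) (out : Option String) : Prop := out = find_best_lm_model_on_disk_alt recommended_model disk_models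
instance (recommended_model : String) (disk_models : List String) (out : Option String) : Decidable (Spec_find_best_lm_model_on_disk recommended_model disk_models out) := by unfold Spec_find_best_lm_model_on_disk; infer_instance

-- ===== CLAIM (what is proved, stated in full; the proofs are below) =====
def Claim_equal_find_best_lm_model_on_disk : Prop := ∀ (recommended_model : String) (disk_models : List String), Dom_find_best_lm_model_on_disk recommended_model disk_models → Spec_find_best_lm_model_on_disk recommended_model disk_models (find_best_lm_model_on_disk recommended_model disk_models)

-- ===== LEMMAS AND PROOFS =====

theorem lm_size_alt_eq (m : String) : lm_size_alt m = get_lm_model_size m := by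
  unfold lm_size_alt get_lm_model_size
  simp [List.find?]
  split_ifs <;> simp_all

theorem fbm_loop_mem (r t : String) (best : Option String) (ds : List String)
    (h : r ∈ ds) : fbm_loop r t best ds = some r := by
  induction ds generalizing best with
  | nil => cases h
  | cons m rest ih =>
    by_cases hm : m = r
    · subst hm; simp [fbm_loop]
    · rcases List.mem_cons.mp h with h1 | h2
      · exact absurd h1.symm hm
      · unfold fbm_loop
        split_ifs <;> simp [ih _ h2]

theorem fbm_loop_not_mem (r t : String) (best : Option String) (ds : List String)
    (h : r ∉ ds) :
    fbm_loop r t best ds =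
      List.foldl
        (fun acc x => match acc with
          | none => some x
          | some c => if PySem.Str.len c < PySem.Str.len x then some x else some c)
        best (ds.filter (fun m => get_lm_model_size m == t)) := by
  induction ds generalizing best with
  | nil => simp [fbm_loop]
  | cons m rest ih =>
    have hm : ¬ m = r := fun e => h (e ▸ List.mem_cons_self ..)
    have hr : r ∉ rest := fun hr => h (List.mem_cons_of_mem _ hr)
    unfold fbm_loop
    rw [List.filter_cons]
    by_cases hsz : get_lm_model_size m = t
    · cases best with
      | none =>
        simp [hm, hsz, lm_size_alt_eq, ih _ hr]
      | some c =>
        by_cases hlt : c.length < m.length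
        · simp [hm, hsz, lm_size_alt_eq, hlt, ih _ hr]
        · simp [hm, hsz, lm_size_alt_eq, hlt, ih _ hr]
    · simp [hm, hsz, lm_size_alt_eq, ih _ hr]

theorem max?_fold_eq (xs : List String) :
    List.foldl
      (fun acc x => match acc with
        | none => some x
        | some c => if PySem.Str.len c < PySem.Str.len x then some x else some c)
      none xs = PySem.List.max? xs PySem.Str.len := by
  unfold PySem.List.max?
  congr 1
  funext acc x
  cases acc <;> rfl

theorem fbm_eq (recommended_model : String) (disk_models : List String) :
    find_best_lm_model_on_disk recommended_model disk_models =
      find_best_lm_model_on_disk_alt recommended_model disk_models := by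
  unfold find_best_lm_model_on_disk find_best_lm_model_on_disk_alt
  by_cases h0 : recommended_model = "" ∨ disk_models = []
  · simp [h0]
  · simp only [h0, if_false]
    by_cases hmem : recommended_model ∈ disk_models
    · simp [hmem, fbm_loop_mem]
    · simp only [hmem, if_false]
      rw [fbm_loop_not_mem _ _ _ _ hmem, lm_size_alt_eq]
      set cands := disk_models.filter (fun m => get_lm_model_size m == get_lm_model_size recommended_model) with hc
      by_cases hne : cands = []
      · simp [hne]
      · rw [max?_fold_eq]
        cases hmx : PySem.List.max? cands PySem.Str.len with
        | none => exact absurd ((PySem.List.max?_eq_none_iff cands PySem.Str.len).mp hmx) hne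
        | some b => simp [hne]

-- ===== VERDICT (by name: the statement is the Claim_ definition above) =====
theorem find_best_lm_model_on_disk_spec : Claim_equal_find_best_lm_model_on_disk := by
  intro r ds _
  exact fbm_eq r ds
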